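-- pv_equiv track=rewrite | github.com/ThiagoDe/codesignal_core_python | callPhone.py | solution
-- ===== SOURCE A (Python) =====
-- def solution(min1, min2_10, min11, s):
--     total = 0
--     if s >= min1:
--         s -= min1
--         total += 1
--     if s >= min2_10:  # 17 1
--         for m in range(0, 9):
--             if s >= min2_10:
--                 total += 1
--                 s -= min2_10
--     if s >= min11 and total == 10:
--         total += s // min11
--
--     return total
-- ===== SOURCE B (Python) =====
-- def solution(min1, min2_10, min11, s):
--     first = 1 if s >= min1 else 0
--     r = s - first * min1
--     if r < min2_10:
--         return first
--     if min2_10 > 0 and r < 9 * min2_10: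
--         return first + r // min2_10
--     r -= 9 * min2_10
--     if first == 1 and r >= min11:
--         return 10 + r // min11
--     return first + 9
-- ===== Notes on version B (the rewrite author's own statement) =====
-- stated objective: simpler
-- what changed: replaces A's accumulator mutation with the fixed 9-iteration middle-tier subtraction loop by an early-return chain that classifies the input once and computes each tier's answer by a single closed-form integer division
import Mathlib
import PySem

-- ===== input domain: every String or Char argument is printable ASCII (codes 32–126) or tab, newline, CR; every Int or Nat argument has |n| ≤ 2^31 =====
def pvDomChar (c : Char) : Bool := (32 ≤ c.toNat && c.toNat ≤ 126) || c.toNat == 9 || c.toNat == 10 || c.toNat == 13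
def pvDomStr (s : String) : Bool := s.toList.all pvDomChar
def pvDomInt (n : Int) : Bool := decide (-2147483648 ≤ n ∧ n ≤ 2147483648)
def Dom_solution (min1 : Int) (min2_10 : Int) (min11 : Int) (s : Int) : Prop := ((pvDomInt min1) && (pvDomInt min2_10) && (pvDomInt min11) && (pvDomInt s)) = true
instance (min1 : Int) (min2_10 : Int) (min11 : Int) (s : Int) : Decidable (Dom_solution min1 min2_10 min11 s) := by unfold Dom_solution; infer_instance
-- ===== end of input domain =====

-- B replaces A's mutating 9-iteration middle-tier loop by an early-return chain of
-- closed-form per-tier answers (objective: simpler); same return value wherever A returns.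

-- ===== PORT A =====
-- body of A's for-loop: if s >= min2_10: total += 1; s -= min2_10
def pvA_step (min2_10 : Int) (ts : Int × Int) : Int × Int :=
  if ts.2 ≥ min2_10 then (ts.1 + 1, ts.2 - min2_10) else ts

-- total = 0; if s >= min1: s -= min1; total += 1
def pvA_first (min1 : Int) (s : Int) : Int × Int :=
  if s ≥ min1 then (0 + 1, s - min1) else (0, s)

-- if s >= min2_10: for m in range(0, 9): <pvA_step>
def pvA_mid (min2_10 : Int) (ts : Int × Int) : Int × Int :=
  if ts.2 ≥ min2_10 then (PySem.List.pyRange 0 9 1).foldl (fun a _ => pvA_step min2_10 a) ts else ts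

-- if s >= min11 and total == 10: total += s // min11
def pvA_third (min11 : Int) (ts : Int × Int) : Int :=
  if ts.2 ≥ min11 ∧ ts.1 = 10 then ts.1 + PySem.Int.floordiv ts.2 min11 else ts.1

def solution (min1 : Int) (min2_10 : Int) (min11 : Int) (s : Int) : Int :=
  pvA_third min11 (pvA_mid min2_10 (pvA_first min1 s))

-- ===== PORT B =====
-- early-return chain of Source B, ported as nested if-then-else over plain lets
def solution_alt (min1 : Int) (min2_10 : Int) (min11 : Int) (s : Int) : Int :=
  let first : Int := if s ≥ min1 then 1 else 0
  let r : Int := s - first * min1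
  if r < min2_10 then first
  else if min2_10 > 0 ∧ r < 9 * min2_10 then first + PySem.Int.floordiv r min2_10
  else
    let r2 : Int := r - 9 * min2_10
    if first = 1 ∧ r2 ≥ min11 then 10 + PySem.Int.floordiv r2 min11
    else first + 9

-- ===== PRECONDITION & SPEC =====
-- Pre_ excludes exactly the inputs on which A raises ZeroDivisionError:
-- min11 == 0 while the call reaches the 11+ tier (total == 10 and remaining s >= min11 = 0).
def Pre_solution (min1 : Int) (min2_10 : Int) (min11 : Int) (s : Int) : Prop :=
  ¬ (min11 = 0 ∧ s ≥ min1 ∧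
     ((min2_10 > 0 ∧ s - min1 ≥ 9 * min2_10) ∨ (min2_10 ≤ 0 ∧ s - min1 ≥ min2_10)) ∧
     s - min1 - 9 * min2_10 ≥ 0)
instance (min1 : Int) (min2_10 : Int) (min11 : Int) (s : Int) : Decidable (Pre_solution min1 min2_10 min11 s) := by unfold Pre_solution; infer_instance

def pvWitness_solution : Int × Int × Int × Int := (1, 2, 3, 100)

def Spec_solution (min1 : Int) (min2_10 : Int) (min11 : Int) (s : Int) (out : Int) : Prop := out = solution_alt min1 min2_10 min11 s
instance (min1 : Int) (min2_10 : Int) (min11 : Int) (s : Int) (out : Int) : Decidable (Spec_solution min1 min2_10 min11 s out) := by unfold Spec_solution; infer_instance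

-- ===== CLAIM (what is proved, stated in full; the proofs are below) =====
def Claim_equal_solution : Prop := ∀ (min1 : Int) (min2_10 : Int) (min11 : Int) (s : Int), Dom_solution min1 min2_10 min11 s → Pre_solution min1 min2_10 min11 s → Spec_solution min1 min2_10 min11 s (solution min1 min2_10 min11 s)

-- ===== LEMMAS AND PROOFS =====

-- a fold that ignores the elements is an iterate
theorem foldl_const {α β : Type} (g : α → α) (l : List β) (init : α) :
    l.foldl (fun a _ => g a) init = g^[l.length] init := by
  induction l generalizing init with
  | nil => rfl
  | cons x xs ih =>
      simp only [List.foldl_cons, List.length_cons, ih, Function.iterate_succ_apply]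

-- once the remaining seconds drop below the tier price, the loop body is the identity
theorem step_fix (d : Int) (n : Nat) (ts : Int × Int) (h : ts.2 < d) :
    (pvA_step d)^[n] ts = ts := by
  induction n with
  | zero => rfl
  | succ n ih =>
      rw [Function.iterate_succ_apply, pvA_step, if_neg (by omega), ih]

theorem iter_pos (d : Int) (hd : 0 < d) (n : Nat) (t s : Int) (h : d ≤ s) :
    (pvA_step d)^[n] (t, s)
      = (t + min (n : Int) (PySem.Int.floordiv s d),
         s - min (n : Int) (PySem.Int.floordiv s d) * d) := by
  induction n generalizing t s with
  | zero =>
      have h1 : (1 : Int) ≤ PySem.Int.floordiv s d :=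
        (PySem.Int.le_floordiv_iff_mul_le hd).mpr (by omega)
      have hm : min ((0 : Nat) : Int) (PySem.Int.floordiv s d) = 0 :=
        min_eq_left (by push_cast; linarith)
      simp only [Function.iterate_zero, id_eq, hm, Prod.mk.injEq]
      constructor <;> ring
  | succ n ih =>
      rw [Function.iterate_succ_apply, pvA_step, if_pos (by omega : (t, s).2 ≥ d)]
      by_cases h2 : d ≤ s - d
      · rw [ih (t + 1) (s - d) h2]
        obtain ⟨hq1, hq2⟩ := (PySem.Int.floordiv_eq_iff_of_pos hd
          (a := s) (q := PySem.Int.floordiv s d)).mp rfl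
        have hq' : PySem.Int.floordiv (s - d) d = PySem.Int.floordiv s d - 1 := by
          refine (PySem.Int.floordiv_eq_iff_of_pos hd).mpr ⟨?_, ?_⟩ <;> nlinarith
        have hge : (1 : Int) ≤ PySem.Int.floordiv s d :=
          (PySem.Int.le_floordiv_iff_mul_le hd).mpr (by omega)
        rw [hq']
        have hm : min ((n + 1 : Nat) : Int) (PySem.Int.floordiv s d)
            = min (n : Int) (PySem.Int.floordiv s d - 1) + 1 := by
          push_cast; omega
        rw [hm, Prod.mk.injEq]
        constructor <;> ring
      · have hq : PySem.Int.floordiv s d = 1 :=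
          (PySem.Int.floordiv_eq_iff_of_pos hd).mpr ⟨by omega, by omega⟩
        rw [step_fix d n (t + 1, s - d) (by omega), hq]
        have hm : min ((n + 1 : Nat) : Int) 1 = 1 := by push_cast; omega
        rw [hm, Prod.mk.injEq]
        constructor <;> ring

theorem iter_nonpos (d : Int) (hd : d ≤ 0) (n : Nat) (t s : Int) (h : d ≤ s) :
    (pvA_step d)^[n] (t, s) = (t + (n : Int), s - (n : Int) * d) := by
  induction n generalizing t s with
  | zero => simp
  | succ n ih =>
      rw [Function.iterate_succ_apply, pvA_step, if_pos (by omega : (t, s).2 ≥ d),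
        ih (t + 1) (s - d) (by omega), Prod.mk.injEq]
      push_cast
      constructor <;> ring

-- A's middle-tier loop characterised in closed form
theorem mid_pos (d t r : Int) (hd : 0 < d) (h : d ≤ r) :
    pvA_mid d (t, r) = (t + min 9 (PySem.Int.floordiv r d),
                        r - min 9 (PySem.Int.floordiv r d) * d) := by
  unfold pvA_mid
  rw [if_pos (by exact h), foldl_const, (by decide : (PySem.List.pyRange 0 9 1).length = 9),
    iter_pos d hd 9 t r h]
  norm_num

theorem mid_nonpos (d t r : Int) (hd : d ≤ 0) (h : d ≤ r) :
    pvA_mid d (t, r) = (t + 9, r - 9 * d) := by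
  unfold pvA_mid
  rw [if_pos (by exact h), foldl_const, (by decide : (PySem.List.pyRange 0 9 1).length = 9),
    iter_nonpos d hd 9 t r h]
  norm_num

theorem mid_id (d t r : Int) (h : r < d) : pvA_mid d (t, r) = (t, r) := by
  unfold pvA_mid
  rw [if_neg (by omega)]

theorem tail_eq (d min11 f r : Int) (hf : f = 0 ∨ f = 1) :
    pvA_third min11 (pvA_mid d (f, r)) =
      (if r < d then f
       else if d > 0 ∧ r < 9 * d then f + PySem.Int.floordiv r d
       else if f = 1 ∧ r - 9 * d ≥ min11 then 10 + PySem.Int.floordiv (r - 9 * d) min11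
       else f + 9) := by
  by_cases hg : r < d
  · rw [mid_id d f r hg, if_pos hg]
    unfold pvA_third
    rw [if_neg ?_]
    intro hc
    rcases hf with h | h <;> (have := hc.2; omega)
  · have hg2 : d ≤ r := by omega
    by_cases hd : 0 < d
    · rw [mid_pos d f r hd hg2]
      obtain ⟨hq1, hq2⟩ := (PySem.Int.floordiv_eq_iff_of_pos hd
        (a := r) (q := PySem.Int.floordiv r d)).mp rfl
      set q : Int := PySem.Int.floordiv r d with hqd
      by_cases h9 : r < 9 * d
      · have hq9 : q < 9 := by nlinarith
        rw [if_neg hg, if_pos ⟨hd, h9⟩, min_eq_right (by omega : q ≤ 9)]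
        unfold pvA_third
        rw [if_neg ?_]
        intro hc
        rcases hf with h | h <;> (have := hc.2; omega)
      · have hq9 : 9 ≤ q := by
          by_contra hc; push_neg at hc; nlinarith
        rw [if_neg hg, if_neg (by intro hc; exact absurd hc.2 (by omega)),
          min_eq_left (by omega : (9 : Int) ≤ q)]
        unfold pvA_third
        rcases hf with h | h <;> subst h
        · rw [if_neg (by intro hc; exact absurd hc.2 (by norm_num)),
            if_neg (by intro hc; exact absurd hc.1 (by norm_num))]
        · split_ifs with h1 h2 h2
          · linarith
          · exact absurd ⟨rfl, by linarith [h1.1]⟩ h2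
          · exact absurd ⟨by linarith [h2.2], by norm_num⟩ h1
          · norm_num
    · have hd2 : d ≤ 0 := by omega
      rw [mid_nonpos d f r hd2 hg2, if_neg hg,
        if_neg (by intro hc; exact absurd hc.1 hd)]
      unfold pvA_third
      rcases hf with h | h <;> subst h
      · rw [if_neg (by intro hc; exact absurd hc.2 (by norm_num)),
          if_neg (by intro hc; exact absurd hc.1 (by norm_num))]
      · split_ifs with h1 h2 h2
        · linarith
        · exact absurd ⟨rfl, by linarith [h1.1]⟩ h2
        · exact absurd ⟨by linarith [h2.2], by norm_num⟩ h1
        · norm_num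

-- ===== VERDICT (by name: the statement is the Claim_ definition above) =====
theorem solution_spec : Claim_equal_solution := by
  intro min1 d min11 s _ _
  show solution min1 d min11 s = solution_alt min1 d min11 s
  unfold solution solution_alt pvA_first
  by_cases hs : s ≥ min1
  · simp only [if_pos hs]
    rw [show ((0 : Int) + 1) = 1 from by norm_num,
      tail_eq d min11 1 (s - min1) (Or.inr rfl)]
    norm_num
  · simp only [if_neg hs]
    rw [tail_eq d min11 0 s (Or.inl rfl)]
    norm_num
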